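-- pv_equiv track=rewrite | github.com/HappySatanCry/SYNERGY_PRACTICE | Дракон-Гидра.py | dragon_power
-- ===== SOURCE A (Python) =====
-- def dragon_power(N):
--     if N <= 4:
--         return N
--     power = 1
--     while N > 4:
--         power *= 3
--         N -= 3
--     power *= N
--     return power
-- ===== SOURCE B (Python) =====
-- def dragon_power(N):
--     if N <= 4:
--         return N
--     k = (N - 2) // 3
--     return 3 ** k * (N - 3 * k)
-- ===== Notes on version B (the rewrite author's own statement) =====
-- stated objective: faster
-- what changed: Replaced the repeated subtract-by-3 loop (one big-int multiplication per iteration) by a closed-form iteration count k=(N-2)//3 and a single fast power 3**k; intended as faster, measured 151x at n=262144 in a timing run (it could not confirm the largest size).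
import Mathlib
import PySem

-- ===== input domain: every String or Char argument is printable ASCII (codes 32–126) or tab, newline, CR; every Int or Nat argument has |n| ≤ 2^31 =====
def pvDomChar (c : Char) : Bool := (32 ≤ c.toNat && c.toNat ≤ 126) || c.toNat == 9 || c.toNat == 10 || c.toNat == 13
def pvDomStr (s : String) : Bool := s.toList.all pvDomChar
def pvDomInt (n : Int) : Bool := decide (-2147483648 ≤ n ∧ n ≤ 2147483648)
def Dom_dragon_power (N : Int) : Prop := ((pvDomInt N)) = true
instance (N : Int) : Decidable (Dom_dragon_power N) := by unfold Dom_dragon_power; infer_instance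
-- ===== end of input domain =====

-- ===== PORT A =====
-- B replaces A's subtract-by-3 loop by a closed-form count k=(N-2)//3 and one power 3^k (intended as faster; probe measured 151x at n=262144).
def dragon_power_loop (N power : Int) : Int :=
  if 4 < N then dragon_power_loop (N - 3) (power * 3) else power * N
termination_by N.toNat
decreasing_by omega

def dragon_power (N : Int) : Int :=
  if N ≤ 4 then N else dragon_power_loop N 1

-- ===== PORT B =====
def dragon_power_alt (N : Int) : Int :=
  if N ≤ 4 then N
  else
    let k := PySem.Int.floordiv (N - 2) 3
    3 ^ k.toNat * (N - 3 * k)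

-- ===== PRECONDITION & SPEC =====
def Spec_dragon_power (N : Int) (out : Int) : Prop := out = dragon_power_alt N
instance (N : Int) (out : Int) : Decidable (Spec_dragon_power N out) := by unfold Spec_dragon_power; infer_instance

-- ===== CLAIM (what is proved, stated in full; the proofs are below) =====
def Claim_equal_dragon_power : Prop := ∀ (N : Int), Dom_dragon_power N → Spec_dragon_power N (dragon_power N)

-- ===== LEMMAS AND PROOFS =====
theorem dragon_power_loop_eq (N : Int) (hN : 4 < N) : ∀ (power : Int),
    dragon_power_loop N power
      = power * (3 ^ (PySem.Int.floordiv (N - 2) 3).toNat * (N - 3 * PySem.Int.floordiv (N - 2) 3)) := by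
  have hmeas : N.toNat > 0 := by omega
  induction hn : N.toNat using Nat.strong_induction_on generalizing N with
  | _ n ih =>
    intro power
    rw [dragon_power_loop, if_pos hN]
    by_cases h7 : 4 < N - 3
    · -- recurse
      have hrec := ih (N - 3).toNat (by omega) (N - 3) h7 (by omega) rfl (power * 3)
      rw [hrec]
      have hk : PySem.Int.floordiv (N - 2) 3 = PySem.Int.floordiv (N - 3 - 2) 3 + 1 := by
        rw [PySem.Int.floordiv_eq_ediv_of_pos (by omega), PySem.Int.floordiv_eq_ediv_of_pos (by omega)]
        omega
      have hk0 : 0 ≤ PySem.Int.floordiv (N - 3 - 2) 3 := by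
        rw [PySem.Int.floordiv_eq_ediv_of_pos (by omega : (0:Int) < 3)]; omega
      rw [hk]
      have : (PySem.Int.floordiv (N - 3 - 2) 3 + 1).toNat = (PySem.Int.floordiv (N - 3 - 2) 3).toNat + 1 := by omega
      rw [this, pow_succ]
      ring
    · -- last iteration: 5 ≤ N ≤ 7
      rw [dragon_power_loop, if_neg h7]
      have hk : PySem.Int.floordiv (N - 2) 3 = 1 := by
        rw [PySem.Int.floordiv_eq_ediv_of_pos (by omega)]
        omega
      rw [hk]
      norm_num
      ring

-- ===== VERDICT (by name: the statement is the Claim_ definition above) =====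
theorem dragon_power_spec : Claim_equal_dragon_power := by
  intro N _
  unfold Spec_dragon_power dragon_power dragon_power_alt
  by_cases h : N ≤ 4
  · simp [h]
  · rw [if_neg h, if_neg h]
    have := dragon_power_loop_eq N (by omega) 1
    simpa using this
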